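-- pv_equiv track=rewrite | github.com/daniel-reich/turbo-robot | 88WesDgd2Ge9JEiJM_4.py | almost_uniform
-- ===== SOURCE A (Python) =====
-- def almost_uniform(nums):
--     max_length = 0
--     for i in range(len(nums)):
--        if nums[i] - 1 in nums:
--             cnt = nums.count(nums[i]) + nums.count(nums[i]-1)
--             max_length = max(max_length, cnt)
--        if nums[i] + 1 in nums:
--             cnt = nums.count(nums[i]) + nums.count(nums[i]+1)
--             max_length = max(max_length, cnt)
--     return max_length
-- ===== SOURCE B (Python) =====
-- def almost_uniform(nums):
--     # one pass to count frequencies, then one pass over distinct keys (O(n) vs A's O(n^2))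
--     counts = {}
--     for x in nums:
--         counts[x] = counts.get(x, 0) + 1
--     best = 0
--     for k, v in counts.items():
--         if k + 1 in counts:
--             best = max(best, v + counts[k + 1])
--     return best
-- ===== Notes on version B (the rewrite author's own statement) =====
-- stated objective: faster
-- what changed: Replaced the O(n^2) loop that re-scans the whole list with membership tests and list.count for every index by a single frequency-dictionary pass followed by one pass over the distinct keys checking only key+1.
import Mathlib
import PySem

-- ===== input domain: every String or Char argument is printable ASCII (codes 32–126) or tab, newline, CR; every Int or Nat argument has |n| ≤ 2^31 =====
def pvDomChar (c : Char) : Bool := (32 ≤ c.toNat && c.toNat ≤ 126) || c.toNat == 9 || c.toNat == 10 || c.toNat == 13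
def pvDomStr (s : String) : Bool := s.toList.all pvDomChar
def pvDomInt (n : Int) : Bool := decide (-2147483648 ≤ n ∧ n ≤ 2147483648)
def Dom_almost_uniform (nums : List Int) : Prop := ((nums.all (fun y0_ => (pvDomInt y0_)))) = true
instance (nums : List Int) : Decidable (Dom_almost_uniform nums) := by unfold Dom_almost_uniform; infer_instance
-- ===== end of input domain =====

-- B replaces A's quadratic rescanning (membership + list.count per index) by one frequency-dictionary
-- pass plus one pass over the distinct keys checking only key+1 (objective: faster, asymptotic).


-- ===== PORT A =====
-- for i in range(len(nums)): test nums[i]∓1 membership, max with nums.count(nums[i]) + nums.count(nums[i]∓1)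
def almost_uniform (nums : List Int) : Int :=
  (PySem.List.pyRange 0 (nums.length : Int) 1).foldl
    (fun max_length i =>
      let x := PySem.List.pyGetD nums i 0   -- index always in range here
      let max_length :=
        if (x - 1) ∈ nums then
          max max_length ((nums.count x : Int) + (nums.count (x - 1) : Int))
        else max_length
      if (x + 1) ∈ nums then
        max max_length ((nums.count x : Int) + (nums.count (x + 1) : Int))
      else max_length)
    0

-- ===== PORT B =====
-- counts = {}; for x in nums: counts[x] = counts.get(x, 0) + 1; then one pass over counts.items()
def almost_uniform_alt (nums : List Int) : Int :=
  let counts : PySem.Dict Int Int :=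
    nums.foldl (fun d x => d.insert x (d.getD x 0 + 1)) PySem.Dict.empty
  counts.items.foldl
    (fun best kv =>
      if counts.contains (kv.1 + 1) then max best (kv.2 + counts.getD (kv.1 + 1) 0)
      else best)
    0

-- ===== PRECONDITION & SPEC =====
def Spec_almost_uniform (nums : List Int) (out : Int) : Prop := out = almost_uniform_alt nums
instance (nums : List Int) (out : Int) : Decidable (Spec_almost_uniform nums out) := by unfold Spec_almost_uniform; infer_instance

-- ===== CLAIM (what is proved, stated in full; the proofs are below) =====
def Claim_equal_almost_uniform : Prop := ∀ (nums : List Int), Dom_almost_uniform nums → Spec_almost_uniform nums (almost_uniform nums)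

-- ===== LEMMAS AND PROOFS =====

-- the per-element candidate lists: each program is a running max over these values
def candA (nums : List Int) (x : Int) : List Int :=
  (if (x - 1) ∈ nums then [(nums.count x : Int) + (nums.count (x - 1) : Int)] else []) ++
  (if (x + 1) ∈ nums then [(nums.count x : Int) + (nums.count (x + 1) : Int)] else [])

def candB (nums : List Int) (k : Int) : List Int :=
  if (k + 1) ∈ nums then [(nums.count k : Int) + (nums.count (k + 1) : Int)] else []

-- a fold whose step is itself a max-fold over g x is the max-fold over the flattened candidates
theorem foldl_flat (g : Int → List Int) (l : List Int) (a : Int) :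
    l.foldl (fun m x => (g x).foldl max m) a = (l.flatMap g).foldl max a := by
  induction l generalizing a with
  | nil => rfl
  | cons x t ih => simp [List.flatMap_cons, List.foldl_append, ih]

theorem stepA_eq (nums : List Int) (m x : Int) :
    (let m' := if (x - 1) ∈ nums then
        max m ((nums.count x : Int) + (nums.count (x - 1) : Int)) else m;
      if (x + 1) ∈ nums then
        max m' ((nums.count x : Int) + (nums.count (x + 1) : Int)) else m')
    = (candA nums x).foldl max m := by
  unfold candA
  by_cases h1 : (x - 1) ∈ nums <;> by_cases h2 : (x + 1) ∈ nums <;>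
    simp [h1, h2, List.foldl]

theorem stepB_eq (nums : List Int) (m k : Int) :
    (if (k + 1) ∈ nums then
        max m ((nums.count k : Int) + (nums.count (k + 1) : Int)) else m)
    = (candB nums k).foldl max m := by
  unfold candB
  by_cases h : (k + 1) ∈ nums <;> simp [h, List.foldl]

-- two max-folds from 0 over lists with the same members are equal
theorem foldl_max_eq_of_mem_iff (l1 l2 : List Int)
    (h : ∀ v, v ∈ l1 ↔ v ∈ l2) : l1.foldl max 0 = l2.foldl max 0 := by
  have le12 : l1.foldl max 0 ≤ l2.foldl max 0 := by
    rcases PySem.List.foldl_max_mem l1 0 with h0 | hm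
    · rw [h0]; exact (PySem.List.le_foldl_max l2 0).1
    · exact (PySem.List.le_foldl_max l2 0).2 _ ((h _).mp hm)
  have le21 : l2.foldl max 0 ≤ l1.foldl max 0 := by
    rcases PySem.List.foldl_max_mem l2 0 with h0 | hm
    · rw [h0]; exact (PySem.List.le_foldl_max l1 0).1
    · exact (PySem.List.le_foldl_max l1 0).2 _ ((h _).mpr hm)
  exact le_antisymm le12 le21

-- the two candidate pools have the same members: both are exactly
-- { count a + count (a+1) : a ∈ nums, a+1 ∈ nums }
theorem cand_mem_iff (nums : List Int) (v : Int) :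
    v ∈ nums.flatMap (candA nums) ↔ v ∈ (PySem.Set.ofList nums).flatMap (candB nums) := by
  simp only [List.mem_flatMap, PySem.Set.mem_ofList]
  constructor
  · rintro ⟨x, hx, hv⟩
    unfold candA at hv
    rcases List.mem_append.mp hv with hv | hv
    · by_cases h1 : (x - 1) ∈ nums
      · simp [h1] at hv
        refine ⟨x - 1, h1, ?_⟩
        unfold candB
        simp [show x - 1 + 1 = x by ring, hx, hv, add_comm]
      · simp [h1] at hv
    · by_cases h2 : (x + 1) ∈ nums
      · simp [h2] at hv
        exact ⟨x, hx, by unfold candB; simp [h2, hv]⟩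
      · simp [h2] at hv
  · rintro ⟨k, hk, hv⟩
    unfold candB at hv
    by_cases h : (k + 1) ∈ nums
    · simp [h] at hv
      refine ⟨k, hk, ?_⟩
      unfold candA
      simp [h, hv]
    · simp [h] at hv

-- A as a max-fold over its candidate pool
theorem A_eq (nums : List Int) :
    almost_uniform nums = (nums.flatMap (candA nums)).foldl max 0 := by
  have hf : (fun (max_length i : Int) =>
      let x := PySem.List.pyGetD nums i 0
      let max_length :=
        if (x - 1) ∈ nums then
          max max_length ((nums.count x : Int) + (nums.count (x - 1) : Int))
        else max_length
      if (x + 1) ∈ nums then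
        max max_length ((nums.count x : Int) + (nums.count (x + 1) : Int))
      else max_length)
      = (fun m i => (candA nums (PySem.List.pyGetD nums i 0)).foldl max m) := by
    funext m i
    exact stepA_eq nums m (PySem.List.pyGetD nums i 0)
  unfold almost_uniform
  rw [hf]
  rw [show (fun (m i : Int) => (candA nums (PySem.List.pyGetD nums i 0)).foldl max m)
      = (fun acc j => (fun a x => (candA nums x).foldl max a) acc (PySem.List.pyGetD nums j 0)) from rfl]
  rw [PySem.List.foldl_pyRange_zero_pyGetD' nums 0 (fun a x => (candA nums x).foldl max a) 0]
  exact foldl_flat _ _ _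

-- B as a max-fold over its candidate pool
theorem B_eq (nums : List Int) :
    almost_uniform_alt nums = ((PySem.Set.ofList nums).flatMap (candB nums)).foldl max 0 := by
  unfold almost_uniform_alt
  dsimp only
  rw [PySem.Dict.foldl_insert_getD_add_one_eq_counter]
  rw [PySem.Dict.items_counter]
  rw [List.foldl_map]
  have hstep : ∀ (m k : Int), ((fun best kv =>
      if (PySem.Dict.counter nums).contains (kv.1 + 1) then
        max best (kv.2 + (PySem.Dict.counter nums).getD (kv.1 + 1) 0)
      else best) m (k, (nums.count k : Int)))
      = (candB nums k).foldl max m := by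
    intro m k
    rw [← stepB_eq]
    simp only [PySem.Dict.contains_counter, PySem.Dict.getD_counter]
    by_cases h : (k + 1) ∈ nums <;> simp [h]
  calc (PySem.Set.ofList nums).foldl (fun m k => (fun best kv =>
          if (PySem.Dict.counter nums).contains (kv.1 + 1) then
            max best (kv.2 + (PySem.Dict.counter nums).getD (kv.1 + 1) 0)
          else best) m (k, (nums.count k : Int))) 0
      = (PySem.Set.ofList nums).foldl (fun m k => (candB nums k).foldl max m) 0 := by
        have : (fun (m k : Int) => (fun best (kv : Int × Int) =>
            if (PySem.Dict.counter nums).contains (kv.1 + 1) then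
              max best (kv.2 + (PySem.Dict.counter nums).getD (kv.1 + 1) 0)
            else best) m (k, (nums.count k : Int)))
            = (fun m k => (candB nums k).foldl max m) := by
          funext m k; exact hstep m k
        rw [this]
    _ = ((PySem.Set.ofList nums).flatMap (candB nums)).foldl max 0 := foldl_flat _ _ _

-- ===== VERDICT (by name: the statement is the Claim_ definition above) =====
theorem almost_uniform_spec : Claim_equal_almost_uniform := by
  intro nums _
  unfold Spec_almost_uniform
  rw [A_eq, B_eq]
  exact foldl_max_eq_of_mem_iff _ _ (cand_mem_iff nums)
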